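-- pv_equiv track=rewrite | github.com/nextprocurement/NP-Company-Process | construir_tabla_companies.py | isPYME
-- ===== SOURCE A (Python) =====
-- from collections import Counter
--
-- def isPYME(SMEIndicators):
--     # Evaluate if is SME based on the SMEAwardedIndicator appearances
--     # Reemplaza todos los valores None por False
--     SMEIndicators = [False if x is None else x for x in SMEIndicators]
--     # Maneja el caso de una lista vacía
--     if not SMEIndicators:
--         return False
--
--     sme_counts = Counter(SMEIndicators)
--     if True in sme_counts and False in sme_counts:
--         return False
--
--     # Asegura que sme_counts no esté vacío y retorna el valor más común
--     if sme_counts: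
--         return sme_counts.most_common(1)[0][0]
--     return False
-- ===== SOURCE B (Python) =====
-- def isPYME(SMEIndicators):
--     # SME iff the list is non-empty and every indicator is truthy
--     # (None and False are both falsy, so no None-replacement pass is needed).
--     return bool(SMEIndicators) and all(x for x in SMEIndicators)
-- ===== Notes on version B (the rewrite author's own statement) =====
-- stated objective: idiomatic
-- what changed: Replaces the None-replacement pass plus Counter/membership/most_common logic with a single short-circuiting all() over the original list (empty list handled by bool()).
import Mathlib
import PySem

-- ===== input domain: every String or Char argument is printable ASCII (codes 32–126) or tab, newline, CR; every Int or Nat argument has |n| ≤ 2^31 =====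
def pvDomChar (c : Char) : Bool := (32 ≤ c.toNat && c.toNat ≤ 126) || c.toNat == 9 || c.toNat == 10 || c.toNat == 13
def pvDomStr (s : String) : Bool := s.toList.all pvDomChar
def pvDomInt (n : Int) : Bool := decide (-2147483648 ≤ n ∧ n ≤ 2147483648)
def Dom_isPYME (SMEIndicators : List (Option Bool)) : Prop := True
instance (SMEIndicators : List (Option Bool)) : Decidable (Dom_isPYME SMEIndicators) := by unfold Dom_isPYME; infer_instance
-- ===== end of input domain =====

-- B replaces A's None-substitution pass + Counter/most_common with one short-circuiting all() scan (idiomatic).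

-- ===== PORT A =====
def isPYME (SMEIndicators : List (Option Bool)) : Bool :=
  -- SMEIndicators = [False if x is None else x for x in SMEIndicators]
  let l := SMEIndicators.map (fun x => match x with | none => false | some b => b)
  -- if not SMEIndicators: return False
  if l.isEmpty then false
  else
    -- sme_counts = Counter(SMEIndicators)
    let counts := PySem.Dict.counter l
    -- if True in sme_counts and False in sme_counts: return False
    if counts.contains true && counts.contains false then false
    else
      -- if sme_counts: return sme_counts.most_common(1)[0][0]
      if counts.size ≠ 0 then
        -- most_common(1)[0][0]: items sorted by count descending (stable), first key;
        -- the [] case is Python's IndexError, unreachable here (counts non-empty)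
        match PySem.List.sorted counts.items (fun p => p.2) true with
        | (k, _) :: _ => k
        | [] => false
      else false

-- ===== PORT B =====
def isPYME_alt (SMEIndicators : List (Option Bool)) : Bool :=
  -- return bool(SMEIndicators) and all(x for x in SMEIndicators)
  !SMEIndicators.isEmpty && SMEIndicators.all (fun x => x.getD false)

-- ===== PRECONDITION & SPEC =====
def Spec_isPYME (SMEIndicators : List (Option Bool)) (out : Bool) : Prop := out = isPYME_alt SMEIndicators
instance (SMEIndicators : List (Option Bool)) (out : Bool) : Decidable (Spec_isPYME SMEIndicators out) := by unfold Spec_isPYME; infer_instance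

-- ===== CLAIM (what is proved, stated in full; the proofs are below) =====
def Claim_equal_isPYME : Prop := ∀ (SMEIndicators : List (Option Bool)), Dom_isPYME SMEIndicators → Spec_isPYME SMEIndicators (isPYME SMEIndicators)

-- ===== LEMMAS AND PROOFS =====

-- a Nodup Bool list whose members are exactly {b} is [b]
theorem nodup_bool_singleton (b : Bool) (s : List Bool) (hn : s.Nodup)
    (hm : ∀ x, x ∈ s ↔ x = b) : s = [b] := by
  match s, hn, hm with
  | [], _, hm => exact absurd ((hm b).mpr rfl) (by simp)
  | [a], _, hm => simp [(hm a).mp (by simp)]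
  | a :: c :: t, hn, hm =>
    have ha : a = b := (hm a).mp (by simp)
    have hc : c = b := (hm c).mp (by simp)
    simp [ha, hc] at hn

theorem counter_single_key (b : Bool) (l : List Bool) (hne : l ≠ [])
    (hall : ∀ x ∈ l, x = b) :
    (PySem.Dict.counter l).items = [(b, (l.count b : Int))] := by
  rw [PySem.Dict.items_counter]
  have h : PySem.Set.ofList l = [b] := by
    refine nodup_bool_singleton b _ (PySem.Set.nodup_ofList l) (fun x => ?_)
    rw [PySem.Set.mem_ofList]
    constructor
    · exact fun hx => hall x hx
    · rintro rfl
      match l, hne with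
      | y :: t, _ => have := hall y (by simp); simp [← this]
  simp [h]

theorem isPYME_spec' (SMEIndicators : List (Option Bool)) :
    isPYME SMEIndicators = isPYME_alt SMEIndicators := by
  unfold isPYME isPYME_alt
  rcases hnil : SMEIndicators with _ | ⟨x, xs⟩
  · simp
  · rw [← hnil]
    have hne : SMEIndicators ≠ [] := by simp [hnil]
    set l := SMEIndicators.map (fun x => match x with | none => false | some b => b) with hl
    have hlne : l ≠ [] := by simp [hl, hne]
    have hlE : l.isEmpty = false := by simp [hlne]
    have hE : SMEIndicators.isEmpty = false := by simp [hne]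
    have hallb : SMEIndicators.all (fun x => x.getD false) = l.all id := by
      simp [hl, List.all_map]
      congr 1
      funext x
      cases x <;> rfl
    simp only [hlE, hE, Bool.not_false, Bool.true_and, if_neg Bool.false_ne_true, hallb]
    by_cases ht : true ∈ l <;> by_cases hf : false ∈ l
    · -- both present: A short-circuits via Counter membership, B's all finds a false
      have hct : (PySem.Dict.counter l).contains true = true := by
        simp [PySem.Dict.contains_counter, ht]
      have hcf : (PySem.Dict.counter l).contains false = true := by
        simp [PySem.Dict.contains_counter, hf]
      have hall : l.all id = false := List.all_eq_false.mpr ⟨false, hf, by simp⟩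
      simp [hct, hcf, hall]
    · -- only true present
      have hallt : ∀ x ∈ l, x = true := by
        intro x hx
        cases x
        · exact absurd hx hf
        · rfl
      have hcf : (PySem.Dict.counter l).contains false = false := by
        simp [PySem.Dict.contains_counter, hf]
      have hitems := counter_single_key true l hlne hallt
      have hsz : (PySem.Dict.counter l).size ≠ 0 := by
        simp [PySem.Dict.size, hitems]
      have hsorted : PySem.List.sorted (PySem.Dict.counter l).items (fun p => p.2) true
          = [(true, (l.count true : Int))] := by
        rw [hitems]
        exact PySem.List.sorted_rev_eq_self_of_pairwise _ _ (by simp)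
      have hall : l.all id = true := List.all_eq_true.mpr (fun x hx => by simpa using hallt x hx)
      simp [hcf, hsz, hsorted, hall]
    · -- only false present
      have hallf : ∀ x ∈ l, x = false := by
        intro x hx
        cases x
        · rfl
        · exact absurd hx ht
      have hct : (PySem.Dict.counter l).contains true = false := by
        simp [PySem.Dict.contains_counter, ht]
      have hitems := counter_single_key false l hlne hallf
      have hsz : (PySem.Dict.counter l).size ≠ 0 := by
        simp [PySem.Dict.size, hitems]
      have hsorted : PySem.List.sorted (PySem.Dict.counter l).items (fun p => p.2) true
          = [(false, (l.count false : Int))] := by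
        rw [hitems]
        exact PySem.List.sorted_rev_eq_self_of_pairwise _ _ (by simp)
      have hall : l.all id = false := List.all_eq_false.mpr ⟨false, hf, by simp⟩
      simp [hct, hsz, hsorted, hall]
    · -- no elements at all: contradicts non-emptiness
      exfalso
      obtain ⟨y, t, hyt⟩ := List.exists_cons_of_ne_nil hlne
      cases y
      · exact hf (by rw [hyt]; simp)
      · exact ht (by rw [hyt]; simp)

-- ===== VERDICT (by name: the statement is the Claim_ definition above) =====
theorem isPYME_spec : Claim_equal_isPYME := by
  intro l _
  exact isPYME_spec' l
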